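-- pv_equiv track=rewrite | github.com/GANGESHOTTEOK/yaman-algorithm | 23_programmers_2018_kakao_blind_recruitment/WONJUNE/프렌즈4블록.py | solution
-- ===== SOURCE A (Python) =====
-- def solution(m, n, board):
--     answer = 0
--     b = [[0 for _ in range(m)] for _ in range(n)]
--     change = [True for _ in range(n)]
--     for i in range(m):
--         for j in range(n):
--             b[j][i] = board[m-1-i][j]
--     while True:
--         s = set()
--         for i in range(n-1):
--             if not change[i] and not change[i+1] or len(b[i]) < 2 or len(b[i+1]) < 2: continue
--             row1, row2 = b[i], b[i+1]
--             block = [[row1[0],row2[0]],['','']]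
--             preCheck = False
--             if row1[0] == row2[0]:
--                 preCheck = True
--             for j in range(1,min(len(row1),len(row2))):
--                 block[1] = block[0]
--                 block[0] = [row1[j], row2[j]]
--                 if preCheck:
--                     if row1[j] == row2[j]:
--                         if row1[j] == block[1][0]:
--                             s.update([(i+1,j), (i+1,j-1), (i,j), (i,j-1)])
--                         else:
--                             if row1[j] == row2[j]:
--                                 preCheck = True
--                             else:
--                                 preCheck = False
--                     else:
--                         preCheck = False
--                 else:
--                     if row1[j] == row2[j]:
--                         preCheck = True
--         if not bool(s): return answer
--         answer += len(s)
--         s = sorted(s, key = lambda x : x[1], reverse=True)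
--         newChange = [False for _ in range(n)]
--         for e in s:
--             b[e[0]].pop(e[1])
--             newChange[e[0]] = True
--         change = newChange
-- ===== SOURCE B (Python) =====
-- def solution(m, n, board):
--     # B: fixed m x n top-down grid with None blanks and an explicit per-column
--     # gravity rebuild, instead of A's transposed shrinking column lists with
--     # dirty-column change tracking and destructive index-sorted pops.
--     answer = 0
--     grid = [[board[i][j] for j in range(n)] for i in range(m)]
--     while True:
--         marked = set()
--         for i in range(m - 1):
--             for j in range(n - 1):
--                 c = grid[i][j]
--                 if c is not None and c == grid[i][j + 1] == grid[i + 1][j] == grid[i + 1][j + 1]: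
--                     marked.update([(i, j), (i, j + 1), (i + 1, j), (i + 1, j + 1)])
--         if not marked:
--             return answer
--         answer += len(marked)
--         cols = []
--         for j in range(n):
--             keep = [grid[i][j] for i in range(m)
--                     if grid[i][j] is not None and (i, j) not in marked]
--             cols.append([None] * (m - len(keep)) + keep)
--         grid = [[cols[j][i] for j in range(n)] for i in range(m)]
-- ===== Notes on version B (the rewrite author's own statement) =====
-- stated objective: alternative
-- what changed: Replaces A's transposed shrinking column lists (stateful two-column preCheck scanner, dirty-column change tracking, destructive index-sorted pops) by a fixed m-by-n top-down grid with None blanks: direct 2x2 four-way matching on the grid, then an explicit per-column gravity rebuild that repacks the surviving cells at the bottom of each column.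
import Mathlib
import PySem

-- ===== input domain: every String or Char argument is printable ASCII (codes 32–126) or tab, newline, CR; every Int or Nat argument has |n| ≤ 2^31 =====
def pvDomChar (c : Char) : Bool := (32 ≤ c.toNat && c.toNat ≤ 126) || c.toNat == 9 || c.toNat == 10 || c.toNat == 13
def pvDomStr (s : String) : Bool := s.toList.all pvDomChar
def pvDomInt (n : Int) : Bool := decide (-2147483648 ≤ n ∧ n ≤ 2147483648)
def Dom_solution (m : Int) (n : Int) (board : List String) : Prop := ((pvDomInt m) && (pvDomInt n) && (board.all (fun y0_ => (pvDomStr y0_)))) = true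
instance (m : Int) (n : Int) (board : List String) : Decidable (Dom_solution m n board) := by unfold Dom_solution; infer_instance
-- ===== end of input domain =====

-- B replaces A's transposed shrinking column lists (stateful two-column preCheck scanner,
-- dirty-column change tracking, destructive index-sorted pops) by a fixed m-by-n top-down
-- grid with blank cells: direct 2x2 four-way matching, then an explicit per-column gravity
-- rebuild that repacks the surviving cells at the bottom (objective: alternative; same cost).
-- A cell is Option Char: some c is a one-character string, none is B's None blank / an
-- out-of-range board access (the latter is excluded by Pre_solution, where Python raises).

-- ===== PORT A =====
-- one iteration of A's inner 'for j in range(1, min(len(row1),len(row2)))' scan;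
-- state = (s, preCheck, (block[0], block[1])); block entries are string values (Option Char),
-- boxed in Option because row1[j] is a list access (some = value; outer none = IndexError, unreachable)
def solutionScanStep (i : Int) (row1 row2 : List (Option Char))
    (st : PySem.Set (Int × Int) × Bool ×
          ((Option (Option Char) × Option (Option Char)) × (Option (Option Char) × Option (Option Char))))
    (j : Int) :
    PySem.Set (Int × Int) × Bool ×
      ((Option (Option Char) × Option (Option Char)) × (Option (Option Char) × Option (Option Char))) :=
  let s := st.1
  let preCheck := st.2.1
  let block1 := st.2.2.1                                   -- block[1] = block[0]
  let block0 := (PySem.List.pyGet? row1 j, PySem.List.pyGet? row2 j)   -- block[0] = [row1[j], row2[j]]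
  if preCheck then
    if PySem.List.pyGet? row1 j = PySem.List.pyGet? row2 j then
      if PySem.List.pyGet? row1 j = block1.1 then
        (PySem.Set.update s [(i+1, j), (i+1, j-1), (i, j), (i, j-1)], preCheck, (block0, block1))
      else
        if PySem.List.pyGet? row1 j = PySem.List.pyGet? row2 j then
          (s, true, (block0, block1))
        else
          (s, false, (block0, block1))
    else
      (s, false, (block0, block1))
  else
    if PySem.List.pyGet? row1 j = PySem.List.pyGet? row2 j then
      (s, true, (block0, block1))
    else
      (s, preCheck, (block0, block1))

-- the whole body of A's 'for j' loop over one adjacent pair of columns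
def solutionScanPair (i : Int) (row1 row2 : List (Option Char)) (s0 : PySem.Set (Int × Int)) :
    PySem.Set (Int × Int) × Bool ×
      ((Option (Option Char) × Option (Option Char)) × (Option (Option Char) × Option (Option Char))) :=
  (PySem.List.pyRange 1 (min (row1.length : Int) (row2.length : Int)) 1).foldl
    (solutionScanStep i row1 row2)
    (s0,
     (if PySem.List.pyGet? row1 0 = PySem.List.pyGet? row2 0 then true else false),
     ((PySem.List.pyGet? row1 0, PySem.List.pyGet? row2 0), (some none, some none)))

-- 'b[e[0]].pop(e[1]); newChange[e[0]] = True' (the pop index is always in range; none is unreachable)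
def solutionRemoveStep (st : List (List (Option Char)) × List Bool) (e : Int × Int) :
    List (List (Option Char)) × List Bool :=
  let col := PySem.List.pyGetD st.1 e.1 []
  let col' := match PySem.List.pop? col e.2 with
    | some r => r.2
    | none => col
  (PySem.List.pySetD st.1 e.1 col', PySem.List.pySetD st.2 e.1 true)

-- the set s built by one round of A ('for i in range(n-1): …')
def solutionRoundSet (n : Int) (b : List (List (Option Char))) (change : List Bool) :
    PySem.Set (Int × Int) :=
  (PySem.List.pyRange 0 (n-1) 1).foldl
    (fun s i =>
      if ((!(PySem.List.pyGetD change i false) && !(PySem.List.pyGetD change (i+1) false))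
          || decide (((PySem.List.pyGetD b i []).length : Int) < 2)
          || decide (((PySem.List.pyGetD b (i+1) []).length : Int) < 2)) = true
      then s
      else (solutionScanPair i (PySem.List.pyGetD b i []) (PySem.List.pyGetD b (i+1) []) s).1)
    PySem.Set.empty

-- A's 'while True' loop; fuel m*n+1 bounds the number of rounds (each non-returning round
-- removes at least one cell of the m*n total), so the fuel-0 branch is never reached
def solutionLoop (n : Int) : Nat → List (List (Option Char)) → List Bool → Int → Int
  | 0, _, _, answer => answer
  | fuel+1, b, change, answer =>
    let s := solutionRoundSet n b change
    if s = [] then answer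
    else
      let st := (PySem.List.sorted s (fun x => x.2) true).foldl solutionRemoveStep
        (b, (PySem.List.pyRange 0 n 1).map (fun _ => false))
      solutionLoop n fuel st.1 st.2 (answer + PySem.Set.len s)

def solution (m : Int) (n : Int) (board : List String) : Int :=
  -- the zero-initialised b and the 'b[j][i] = board[m-1-i][j]' fill loop, as the direct
  -- construction of the same matrix (every entry is assigned exactly once)
  let b := (PySem.List.pyRange 0 n 1).map (fun j =>
    (PySem.List.pyRange 0 m 1).map (fun i =>
      PySem.Str.pyGet? (PySem.List.pyGetD board (m-1-i) "") j))
  let change := (PySem.List.pyRange 0 n 1).map (fun _ => true)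
  solutionLoop n (m.toNat * n.toNat + 1) b change 0

-- ===== PORT B =====
-- grid[i][j] (both indices always in range at the call sites)
def pvGGet (grid : List (List (Option Char))) (i j : Int) : Option Char :=
  PySem.List.pyGetD (PySem.List.pyGetD grid i []) j none

-- B's marked set: 'for i in range(m-1): for j in range(n-1): if c is not None and c == … : marked.update([…])'
def solutionAltMarked (m n : Int) (grid : List (List (Option Char))) : PySem.Set (Int × Int) :=
  (PySem.List.pyRange 0 (m-1) 1).foldl (fun s i =>
    (PySem.List.pyRange 0 (n-1) 1).foldl (fun s j =>
      if pvGGet grid i j ≠ none ∧ pvGGet grid i j = pvGGet grid i (j+1)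
         ∧ pvGGet grid i (j+1) = pvGGet grid (i+1) j
         ∧ pvGGet grid (i+1) j = pvGGet grid (i+1) (j+1)
      then PySem.Set.update s [(i, j), (i, j+1), (i+1, j), (i+1, j+1)]
      else s) s)
    PySem.Set.empty

-- B's gravity rebuild: per column the surviving cells ('keep'), padded with blanks on top,
-- then the grid is re-assembled row by row ('grid = [[cols[j][i] …]]')
def solutionAltCols (m n : Int) (grid : List (List (Option Char)))
    (marked : PySem.Set (Int × Int)) : List (List (Option Char)) :=
  (PySem.List.pyRange 0 n 1).map (fun j =>
    let keep := ((PySem.List.pyRange 0 m 1).filter (fun i =>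
        decide (pvGGet grid i j ≠ none) && !(PySem.Set.contains marked (i, j)))).map
      (fun i => pvGGet grid i j)
    PySem.List.pyRepeat [(none : Option Char)] (m - (keep.length : Int)) ++ keep)

def solutionAltGravity (m n : Int) (grid : List (List (Option Char)))
    (marked : PySem.Set (Int × Int)) : List (List (Option Char)) :=
  (PySem.List.pyRange 0 m 1).map (fun i =>
    (PySem.List.pyRange 0 n 1).map (fun j =>
      PySem.List.pyGetD (PySem.List.pyGetD (solutionAltCols m n grid marked) j []) i none))

-- B's 'while True' loop (same fuel bound as A's port)
def solutionAltLoop (m n : Int) : Nat → List (List (Option Char)) → Int → Int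
  | 0, _, answer => answer
  | fuel+1, grid, answer =>
    let marked := solutionAltMarked m n grid
    if marked = [] then answer
    else solutionAltLoop m n fuel (solutionAltGravity m n grid marked)
      (answer + PySem.Set.len marked)

def solution_alt (m : Int) (n : Int) (board : List String) : Int :=
  -- 'grid = [[board[i][j] for j in range(n)] for i in range(m)]'
  let grid := (PySem.List.pyRange 0 m 1).map (fun i =>
    (PySem.List.pyRange 0 n 1).map (fun j =>
      PySem.Str.pyGet? (PySem.List.pyGetD board i "") j))
  solutionAltLoop m n (m.toNat * n.toNat + 1) grid 0

-- ===== PRECONDITION & SPEC =====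
-- Pre_ excludes exactly the inputs where Python A raises an IndexError: a board with fewer
-- than m rows, or one of the first m rows shorter than n characters (when m, n > 0).
def Pre_solution (m : Int) (n : Int) (board : List String) : Prop :=
  0 < m → 0 < n →
    (m ≤ (board.length : Int) ∧ ∀ s ∈ board.take m.toNat, n ≤ (s.length : Int))
instance (m : Int) (n : Int) (board : List String) : Decidable (Pre_solution m n board) := by
  unfold Pre_solution; infer_instance

def pvWitness_solution : Int × Int × List String := (2, 2, ["AA", "AA"])

def Spec_solution (m : Int) (n : Int) (board : List String) (out : Int) : Prop := out = solution_alt m n board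
instance (m : Int) (n : Int) (board : List String) (out : Int) : Decidable (Spec_solution m n board out) := by unfold Spec_solution; infer_instance

-- ===== CLAIM (what is proved, stated in full; the proofs are below) =====
def Claim_equal_solution : Prop := ∀ (m : Int) (n : Int) (board : List String), Dom_solution m n board → Pre_solution m n board → Spec_solution m n board (solution m n board)

-- ===== LEMMAS AND PROOFS =====

-- ---- proof-side vocabulary ----

-- the four cells A inserts for a 2x2 block found at heights j-1, j of columns i, i+1
def pvCells (i j : Int) : List (Int × Int) := [(i+1, j), (i+1, j-1), (i, j), (i, j-1)]

-- "columns r1, r2 carry a 2x2 block at heights j-1, j"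
def pvBlockRows (r1 r2 : List (Option Char)) (j : Int) : Prop :=
  1 ≤ j ∧ j < min (r1.length : Int) (r2.length : Int) ∧
  PySem.List.pyGet? r1 j = PySem.List.pyGet? r2 j ∧
  PySem.List.pyGet? r1 (j-1) = PySem.List.pyGet? r2 (j-1) ∧
  PySem.List.pyGet? r1 j = PySem.List.pyGet? r1 (j-1)

def pvBlockAt (b : List (List (Option Char))) (i j : Int) : Prop :=
  pvBlockRows (PySem.List.pyGetD b i []) (PySem.List.pyGetD b (i+1) []) j

-- "x is a cell of some 2x2 block of the board b (with n columns)"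
def pvCellOf (n : Int) (b : List (List (Option Char))) (x : Int × Int) : Prop :=
  ∃ i j : Int, 0 ≤ i ∧ i < n - 1 ∧ pvBlockAt b i j ∧ x ∈ pvCells i j

-- A's dirty-column invariant: a pair of columns neither of which changed has no block
def pvInv (n : Int) (b : List (List (Option Char))) (change : List Bool) : Prop :=
  ∀ i j : Int, 0 ≤ i → i < n - 1 →
    PySem.List.pyGetD change i false = false →
    PySem.List.pyGetD change (i+1) false = false →
    ¬ pvBlockAt b i j

-- coordinate change between B's (row-from-top, column) and A's (column, height-from-bottom)
def pvToA (m : Int) (x : Int × Int) : Int × Int := (x.2, m - 1 - x.1)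
def pvToB (m : Int) (y : Int × Int) : Int × Int := (m - 1 - y.2, y.1)

-- the grid B holds, as a function of the column board A holds
def pvGridOf (m n : Int) (b : List (List (Option Char))) : List (List (Option Char)) :=
  (PySem.List.pyRange 0 m 1).map (fun i =>
    (PySem.List.pyRange 0 n 1).map (fun j =>
      (PySem.List.pyGet? (PySem.List.pyGetD b j []) (m-1-i)).join))

-- well-formedness of A's column board: n columns, each at most m high, no blank cells
def pvWF (m n : Int) (b : List (List (Option Char))) : Prop :=
  b.length = n.toNat ∧ ∀ col ∈ b, col.length ≤ m.toNat ∧ ∀ c ∈ col, c.isSome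

-- a column after one removal round, given the collected set s
def pvNewCol (s : PySem.Set (Int × Int)) (k : Int) (col : List (Option Char)) :
    List (Option Char) :=
  ((PySem.List.enumerate col 0).filter (fun hc => !(PySem.Set.contains s (k, hc.1)))).map (·.2)

-- ---- generic fold lemmas ----

theorem pv_foldl_preserve {α σ : Type} (f : σ → α → σ) (P : σ → Prop)
    (h : ∀ s a, P s → P (f s a)) : ∀ (l : List α) (s : σ), P s → P (l.foldl f s) := by
  intro l
  induction l with
  | nil => intro s hs; exact hs
  | cons a t ih => intro s hs; exact ih (f s a) (h s a hs)

theorem pv_mem_foldl_accum {α : Type} (l : List α)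
    (f : PySem.Set (Int × Int) → α → PySem.Set (Int × Int))
    (Q : α → Int × Int → Prop)
    (step : ∀ s a, a ∈ l → ∀ x, (x ∈ f s a ↔ x ∈ s ∨ Q a x)) :
    ∀ s x, x ∈ l.foldl f s ↔ x ∈ s ∨ ∃ a ∈ l, Q a x := by
  induction l with
  | nil => intro s x; simp
  | cons a t ih =>
    intro s x
    rw [List.foldl_cons, ih (fun s a ha => step s a (List.mem_cons_of_mem _ ha)) (f s a) x,
      step s a (List.mem_cons_self) x]
    simp only [List.mem_cons]
    constructor
    · rintro ((h | h) | ⟨b, hb, hq⟩)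
      · exact Or.inl h
      · exact Or.inr ⟨a, Or.inl rfl, h⟩
      · exact Or.inr ⟨b, Or.inr hb, hq⟩
    · rintro (h | ⟨b, (rfl | hb), hq⟩)
      · exact Or.inl (Or.inl h)
      · exact Or.inl (Or.inr hq)
      · exact Or.inr ⟨b, hb, hq⟩

-- ---- A's inner scan: characterization ----

-- extend the "found so far" window from j < k to j < k+1 when nothing is found at k
theorem pv_bump {P : Int → (Int × Int) → Prop} {S s0 : PySem.Set (Int × Int)} {k : Int}
    (hmem : ∀ x, x ∈ S ↔ x ∈ s0 ∨ ∃ j : Int, 1 ≤ j ∧ j < k ∧ P j x)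
    (hnot : ∀ x, ¬ P k x) :
    ∀ x, x ∈ S ↔ x ∈ s0 ∨ ∃ j : Int, 1 ≤ j ∧ j < k + 1 ∧ P j x := by
  intro x
  rw [hmem x]
  constructor
  · rintro (h | ⟨j, h1, h2, h3⟩)
    · exact Or.inl h
    · exact Or.inr ⟨j, h1, by omega, h3⟩
  · rintro (h | ⟨j, h1, h2, h3⟩)
    · exact Or.inl h
    · by_cases hjk : j = k
      · subst hjk; exact absurd h3 (hnot x)
      · exact Or.inr ⟨j, h1, by omega, h3⟩

-- …and when exactly the cells C are found (and added) at k
theorem pv_bump_add {P : Int → (Int × Int) → Prop} {S s0 : PySem.Set (Int × Int)} {k : Int}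
    {C : List (Int × Int)}
    (hmem : ∀ x, x ∈ S ↔ x ∈ s0 ∨ ∃ j : Int, 1 ≤ j ∧ j < k ∧ P j x) (hk : 1 ≤ k)
    (hPk : ∀ x, P k x ↔ x ∈ C) :
    ∀ x, x ∈ PySem.Set.update S C ↔ x ∈ s0 ∨ ∃ j : Int, 1 ≤ j ∧ j < k + 1 ∧ P j x := by
  intro x
  rw [PySem.Set.mem_update, hmem x]
  constructor
  · rintro ((h | ⟨j, h1, h2, h3⟩) | h)
    · exact Or.inl h
    · exact Or.inr ⟨j, h1, by omega, h3⟩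
    · exact Or.inr ⟨k, hk, by omega, (hPk x).mpr h⟩
  · rintro (h | ⟨j, h1, h2, h3⟩)
    · exact Or.inl (Or.inl h)
    · by_cases hjk : j = k
      · subst hjk; exact Or.inr ((hPk x).mp h3)
      · exact Or.inl (Or.inr ⟨j, h1, by omega, h3⟩)

def pvScanAux (i : Int) (r1 r2 : List (Option Char)) (s0 : PySem.Set (Int × Int)) (k : Int) :
    PySem.Set (Int × Int) × Bool ×
      ((Option (Option Char) × Option (Option Char)) × (Option (Option Char) × Option (Option Char))) :=
  (PySem.List.pyRange 1 k 1).foldl (solutionScanStep i r1 r2)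
    (s0,
     (if PySem.List.pyGet? r1 0 = PySem.List.pyGet? r2 0 then true else false),
     ((PySem.List.pyGet? r1 0, PySem.List.pyGet? r2 0), (some none, some none)))

theorem pv_scanPair_eq_scanAux (i : Int) (r1 r2 : List (Option Char)) (s0 : PySem.Set (Int × Int)) :
    solutionScanPair i r1 r2 s0 = pvScanAux i r1 r2 s0 (min (r1.length : Int) (r2.length : Int)) := rfl

theorem pv_scanAux_spec (i : Int) (r1 r2 : List (Option Char)) (s0 : PySem.Set (Int × Int)) :
    ∀ (k : Int), 1 ≤ k →
      (pvScanAux i r1 r2 s0 k).2.1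
          = decide (PySem.List.pyGet? r1 (k-1) = PySem.List.pyGet? r2 (k-1)) ∧
      (pvScanAux i r1 r2 s0 k).2.2.1
          = (PySem.List.pyGet? r1 (k-1), PySem.List.pyGet? r2 (k-1)) ∧
      (∀ x, x ∈ (pvScanAux i r1 r2 s0 k).1 ↔ x ∈ s0 ∨ ∃ j : Int, 1 ≤ j ∧ j < k ∧
          (PySem.List.pyGet? r1 j = PySem.List.pyGet? r2 j ∧
           PySem.List.pyGet? r1 (j-1) = PySem.List.pyGet? r2 (j-1) ∧
           PySem.List.pyGet? r1 j = PySem.List.pyGet? r1 (j-1) ∧ x ∈ pvCells i j)) := by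
  intro k hk
  induction k, hk using Int.le_induction with
  | base =>
    unfold pvScanAux
    rw [PySem.List.pyRange_one_eq_nil (by omega)]
    simp only [List.foldl_nil]
    refine ⟨by simp, by norm_num, ?_⟩
    intro x
    constructor
    · intro h
      exact Or.inl h
    · rintro (h | ⟨j, h1, h2, -⟩)
      · exact h
      · omega
  | succ k hk ih =>
    obtain ⟨ihPre, ihBlock, ihMem⟩ := ih
    have hfold : pvScanAux i r1 r2 s0 (k+1)
        = solutionScanStep i r1 r2 (pvScanAux i r1 r2 s0 k) k := by
      unfold pvScanAux
      rw [PySem.List.pyRange_one_succ_right (by omega : (1:Int) ≤ k), List.foldl_append,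
        List.foldl_cons, List.foldl_nil]
    have hkk : k + 1 - 1 = k := by ring
    rw [hfold, hkk]
    unfold solutionScanStep
    simp only [ihPre, ihBlock, decide_eq_true_eq]
    by_cases hpre : PySem.List.pyGet? r1 (k-1) = PySem.List.pyGet? r2 (k-1)
    · rw [if_pos hpre]
      by_cases heq : PySem.List.pyGet? r1 k = PySem.List.pyGet? r2 k
      · rw [if_pos heq]
        by_cases hprev : PySem.List.pyGet? r1 k = PySem.List.pyGet? r1 (k-1)
        · rw [if_pos hprev]
          exact ⟨by simp [hpre, heq], rfl,
            pv_bump_add ihMem (by omega) (fun x => by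
              simp only [iff_def]
              exact ⟨fun h => h.2.2.2, fun h => ⟨heq, hpre, hprev, h⟩⟩)⟩
        · rw [if_neg hprev, if_pos heq]
          exact ⟨by simp [heq], rfl,
            pv_bump ihMem (fun x => by
              rintro ⟨-, -, h5, -⟩
              exact hprev h5)⟩
      · rw [if_neg heq]
        exact ⟨by simp [heq], rfl,
          pv_bump ihMem (fun x => by
            rintro ⟨h3, -⟩
            exact heq h3)⟩
    · rw [if_neg hpre]
      by_cases heq : PySem.List.pyGet? r1 k = PySem.List.pyGet? r2 k
      · rw [if_pos heq]
        exact ⟨by simp [heq], rfl,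
          pv_bump ihMem (fun x => by
            rintro ⟨-, h4, -⟩
            exact hpre h4)⟩
      · rw [if_neg heq]
        exact ⟨by simp [hpre, heq], rfl,
          pv_bump ihMem (fun x => by
            rintro ⟨h3, -⟩
            exact heq h3)⟩

theorem pv_mem_scanPair (i : Int) (r1 r2 : List (Option Char)) (s0 : PySem.Set (Int × Int)) (x : Int × Int) :
    x ∈ (solutionScanPair i r1 r2 s0).1 ↔
      x ∈ s0 ∨ ∃ j : Int, pvBlockRows r1 r2 j ∧ x ∈ pvCells i j := by
  rw [pv_scanPair_eq_scanAux]
  by_cases hmin : 1 ≤ min (r1.length : Int) (r2.length : Int)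
  · obtain ⟨-, -, hmem⟩ := pv_scanAux_spec i r1 r2 s0 _ hmin
    rw [hmem x]
    unfold pvBlockRows
    constructor
    · rintro (h | ⟨j, h1, h2, h3, h4, h5, h6⟩)
      · exact Or.inl h
      · exact Or.inr ⟨j, ⟨h1, h2, h3, h4, h5⟩, h6⟩
    · rintro (h | ⟨j, ⟨h1, h2, h3, h4, h5⟩, h6⟩)
      · exact Or.inl h
      · exact Or.inr ⟨j, h1, h2, h3, h4, h5, h6⟩
  · unfold pvScanAux
    rw [PySem.List.pyRange_one_eq_nil (by omega)]
    simp only [List.foldl_nil]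
    constructor
    · intro h
      exact Or.inl h
    · rintro (h | ⟨j, ⟨h1, h2, -⟩, -⟩)
      · exact h
      · omega

theorem pv_nodup_scanPair (i : Int) (r1 r2 : List (Option Char)) (s0 : PySem.Set (Int × Int))
    (h : s0.Nodup) : (solutionScanPair i r1 r2 s0).1.Nodup := by
  unfold solutionScanPair
  refine pv_foldl_preserve _
    (fun (st : PySem.Set (Int × Int) × Bool ×
        ((Option (Option Char) × Option (Option Char)) × (Option (Option Char) × Option (Option Char)))) =>
      st.1.Nodup) ?_ _ _ h
  intro st j hnd
  unfold solutionScanStep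
  dsimp only
  split_ifs <;> first
    | exact hnd
    | exact PySem.Set.nodup_update _ _ hnd

-- ---- one round of A: the collected set is exactly the block cells ----

theorem pv_mem_roundSet (n : Int) (b : List (List (Option Char))) (change : List Bool)
    (hInv : pvInv n b change) (x : Int × Int) :
    x ∈ solutionRoundSet n b change ↔ pvCellOf n b x := by
  unfold solutionRoundSet
  have hstep : ∀ (s : PySem.Set (Int × Int)) (i : Int), i ∈ PySem.List.pyRange 0 (n-1) 1 →
      ∀ x : Int × Int,
      (x ∈ (if ((!(PySem.List.pyGetD change i false) && !(PySem.List.pyGetD change (i+1) false))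
          || decide (((PySem.List.pyGetD b i []).length : Int) < 2)
          || decide (((PySem.List.pyGetD b (i+1) []).length : Int) < 2)) = true
        then s
        else (solutionScanPair i (PySem.List.pyGetD b i []) (PySem.List.pyGetD b (i+1) []) s).1)
        ↔ x ∈ s ∨ ∃ j : Int, pvBlockAt b i j ∧ x ∈ pvCells i j) := by
    intro s i hi x
    obtain ⟨hi0, hi1⟩ := PySem.List.mem_pyRange_one.mp hi
    by_cases hc : ((!(PySem.List.pyGetD change i false) && !(PySem.List.pyGetD change (i+1) false))
        || decide (((PySem.List.pyGetD b i []).length : Int) < 2)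
        || decide (((PySem.List.pyGetD b (i+1) []).length : Int) < 2)) = true
    · rw [if_pos hc]
      simp only [Bool.or_eq_true, Bool.and_eq_true, Bool.not_eq_true', decide_eq_true_eq] at hc
      constructor
      · intro h
        exact Or.inl h
      · rintro (h | ⟨j, hbl, -⟩)
        · exact h
        · rcases hc with ((⟨hc1, hc2⟩ | hlen) | hlen)
          · exact absurd hbl (hInv i j hi0 hi1 hc1 hc2)
          · obtain ⟨h1, h2, -⟩ := hbl
            omega
          · obtain ⟨h1, h2, -⟩ := hbl
            omega
    · rw [if_neg hc]
      exact pv_mem_scanPair i _ _ s x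
  rw [pv_mem_foldl_accum _ _ (fun i x => ∃ j : Int, pvBlockAt b i j ∧ x ∈ pvCells i j) hstep
    PySem.Set.empty x]
  unfold pvCellOf
  constructor
  · rintro (h | ⟨i, hi, j, hbl, hcell⟩)
    · simp [PySem.Set.empty] at h
    · obtain ⟨hi0, hi1⟩ := PySem.List.mem_pyRange_one.mp hi
      exact ⟨i, j, hi0, hi1, hbl, hcell⟩
  · rintro ⟨i, j, hi0, hi1, hbl, hcell⟩
    exact Or.inr ⟨i, PySem.List.mem_pyRange_one.mpr ⟨hi0, hi1⟩, j, hbl, hcell⟩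

theorem pv_nodup_roundSet (n : Int) (b : List (List (Option Char))) (change : List Bool) :
    (solutionRoundSet n b change).Nodup := by
  unfold solutionRoundSet
  refine pv_foldl_preserve _ (fun (s : PySem.Set (Int × Int)) => s.Nodup) ?_ _ _ List.nodup_nil
  intro s i hnd
  split_ifs with h
  · exact hnd
  · exact pv_nodup_scanPair _ _ _ _ hnd

-- ---- A's removal pass: sorted pops, decomposed per column ----

def pvPopOne (col : List (Option Char)) (h : Int) : List (Option Char) :=
  match PySem.List.pop? col h with
  | some r => r.2
  | none => col

def pvHeights (L : List (Int × Int)) (k : Nat) : List Int :=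
  (L.filter (fun e => decide (e.1 = (k : Int)))).map (fun e => e.2)

theorem pv_removeFold_spec (L : List (Int × Int)) :
    ∀ (b : List (List (Option Char))) (nc : List Bool),
    (∀ e ∈ L, 0 ≤ e.1 ∧ e.1 < (b.length : Int) ∧ e.1 < (nc.length : Int)) →
    ∀ k : Nat,
      (L.foldl solutionRemoveStep (b, nc)).1[k]?
          = (b[k]?).map (fun col => (pvHeights L k).foldl pvPopOne col) ∧
      (L.foldl solutionRemoveStep (b, nc)).2[k]?
          = (nc[k]?).map (fun v => v || L.any (fun e => decide (e.1 = (k : Int)))) := by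
  induction L with
  | nil =>
    intro b nc hL k
    simp [pvHeights]
  | cons e T ih =>
    intro b nc hL k
    obtain ⟨he0, heb, henc⟩ := hL e List.mem_cons_self
    have hebn : e.1.toNat < b.length := by omega
    have henn : e.1.toNat < nc.length := by omega
    have hcast : (e.1.toNat : Int) = e.1 := Int.toNat_of_nonneg he0
    have hstep : solutionRemoveStep (b, nc) e
        = (b.set e.1.toNat (pvPopOne b[e.1.toNat] e.2), nc.set e.1.toNat true) := by
      simp only [solutionRemoveStep]
      rw [PySem.List.pyGetD_eq_getElem b [] he0 heb,
        PySem.List.pySetD_of_nonneg _ _ he0, PySem.List.pySetD_of_nonneg _ _ he0]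
      rfl
    rw [List.foldl_cons, hstep]
    have hL' : ∀ e' ∈ T, 0 ≤ e'.1
        ∧ e'.1 < ((b.set e.1.toNat (pvPopOne b[e.1.toNat] e.2)).length : Int)
        ∧ e'.1 < ((nc.set e.1.toNat true).length : Int) := by
      intro e' he'
      obtain ⟨h0, h1, h2⟩ := hL e' (List.mem_cons_of_mem _ he')
      simpa using ⟨h0, h1, h2⟩
    obtain ⟨ih1, ih2⟩ := ih _ _ hL' k
    rw [ih1, ih2]
    by_cases hk : e.1.toNat = k
    · subst hk
      have he1k : e.1 = (e.1.toNat : Int) := hcast.symm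
      have hh : pvHeights (e :: T) e.1.toNat = e.2 :: pvHeights T e.1.toNat := by
        unfold pvHeights
        rw [List.filter_cons_of_pos (by simpa using he1k.symm)]
        rfl
      constructor
      · rw [List.getElem?_set, if_pos rfl, if_pos hebn, hh, List.getElem?_eq_getElem hebn]
        simp only [Option.map_some, List.foldl_cons]
      · rw [List.getElem?_set, if_pos rfl, if_pos henn, List.getElem?_eq_getElem henn]
        simp [hcast]
    · have hne : ¬ (e.1 = (k : Int)) := by omega
      have hh : pvHeights (e :: T) k = pvHeights T k := by
        unfold pvHeights
        rw [List.filter_cons_of_neg (by simpa using hne)]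
      constructor
      · rw [List.getElem?_set, if_neg hk, hh]
      · rw [List.getElem?_set, if_neg hk]
        rcases hn : nc[k]? with - | v
        · rfl
        · simp [hne]

-- descending valid pops on one column = filtering out the popped heights
theorem pv_filter_enum_below (xs : List (Option Char)) (s : Int) (ts : List Int)
    (hts : ∀ t' ∈ ts, t' < s) :
    (PySem.List.enumerate xs s).filter (fun hc => !(ts.contains hc.1))
      = PySem.List.enumerate xs s := by
  refine List.filter_eq_self.mpr ?_
  intro p hp
  obtain ⟨k, hk, rfl⟩ := (PySem.List.mem_enumerate_iff xs s p).mp hp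
  simp only [Bool.not_eq_eq_eq_not, Bool.not_true]
  rcases hc : (ts.contains (s + (k : Int))) with - | -
  · rfl
  · have : s + (k : Int) ∈ ts := by simpa using hc
    have := hts _ this
    omega

theorem pv_popFold_eq_filter : ∀ (hs : List Int) (col : List (Option Char)),
    hs.Pairwise (fun a b => b < a) →
    (∀ h ∈ hs, 0 ≤ h ∧ h < (col.length : Int)) →
    hs.foldl pvPopOne col
      = ((PySem.List.enumerate col 0).filter (fun hc => !(hs.contains hc.1))).map
          (fun hc => hc.2) := by
  intro hs
  induction hs with
  | nil =>
    intro col _ _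
    simp [PySem.List.map_snd_enumerate]
  | cons h t ih =>
    intro col hdec hval
    obtain ⟨hh0, hhlen⟩ := hval h List.mem_cons_self
    have hlt : ∀ t' ∈ t, t' < h := fun t' ht' => (List.pairwise_cons.mp hdec).1 t' ht'
    have hp : h.toNat < col.length := by omega
    have hcast : (h.toNat : Int) = h := Int.toNat_of_nonneg hh0
    have hpop : pvPopOne col h = col.eraseIdx h.toNat := by
      unfold pvPopOne
      conv_lhs => rw [← hcast]
      rw [PySem.List.pop?_natCast col h.toNat hp]
    rw [List.foldl_cons, hpop,
      ih _ (List.pairwise_cons.mp hdec).2 (by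
        intro h' ht'
        obtain ⟨a, b⟩ := hval h' (List.mem_cons_of_mem _ ht')
        have := hlt h' ht'
        rw [List.length_eraseIdx_of_lt hp]
        constructor
        · exact a
        · omega)]
    -- both sides: (filtered prefix) ++ suffix
    have hcol : col = col.take h.toNat ++ col[h.toNat] :: col.drop (h.toNat + 1) := by
      conv_lhs => rw [← List.take_append_drop h.toNat col]
      rw [List.drop_eq_getElem_cons hp]
    have htlen : (col.take h.toNat).length = h.toNat := by
      rw [List.length_take]
      omega
    rw [List.eraseIdx_eq_take_drop_succ]
    conv_rhs => rw [hcol]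
    simp only [PySem.List.enumerate_append, List.filter_append, List.map_append]
    congr 1
    · -- prefix: indices < h, so membership in h :: t is membership in t
      refine congrArg _ (List.filter_congr ?_)
      intro p hp'
      obtain ⟨k, hk, rfl⟩ := (PySem.List.mem_enumerate_iff _ 0 p).mp hp'
      rw [htlen] at hk
      simp only [Bool.not_eq_eq_eq_not, List.contains_eq_mem, List.mem_cons,
        Bool.not_not, decide_eq_decide, zero_add]
      constructor
      · intro hmem
        exact Or.inr hmem
      · rintro (heqh | hmem)
        · omega
        · exact hmem
    · -- the popped cell is dropped on the left; both remainders pass the filter whole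
      rw [htlen, PySem.List.enumerate_cons]
      rw [List.filter_cons_of_neg (by simp [hcast])]
      rw [pv_filter_enum_below _ _ t (by
          intro t' ht'
          have := hlt t' ht'
          omega),
        pv_filter_enum_below _ _ (h :: t) (by
          intro t' ht'
          rcases List.mem_cons.mp ht' with rfl | ht''
          · omega
          · have := hlt t' ht''
            omega)]
      rw [PySem.List.map_snd_enumerate, PySem.List.map_snd_enumerate]

theorem pv_removeFold_len (L : List (Int × Int)) :
    ∀ (b : List (List (Option Char))) (nc : List Bool),
      (L.foldl solutionRemoveStep (b, nc)).1.length = b.length ∧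
      (L.foldl solutionRemoveStep (b, nc)).2.length = nc.length := by
  induction L with
  | nil => intro b nc; exact ⟨rfl, rfl⟩
  | cons e T ih =>
    intro b nc
    have hstep : solutionRemoveStep (b, nc) e
        = (PySem.List.pySetD b e.1 (pvPopOne (PySem.List.pyGetD b e.1 []) e.2),
           PySem.List.pySetD nc e.1 true) := rfl
    rw [List.foldl_cons, hstep]
    obtain ⟨h1, h2⟩ := ih (PySem.List.pySetD b e.1 (pvPopOne (PySem.List.pyGetD b e.1 []) e.2))
      (PySem.List.pySetD nc e.1 true)
    constructor
    · rw [h1, PySem.List.length_pySetD]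
    · rw [h2, PySem.List.length_pySetD]

theorem pv_mem_heights (L : List (Int × Int)) (k : Nat) (h' : Int) :
    h' ∈ pvHeights L k ↔ ((k : Int), h') ∈ L := by
  unfold pvHeights
  simp only [List.mem_map, List.mem_filter, decide_eq_true_eq]
  constructor
  · rintro ⟨⟨e1, e2⟩, ⟨heL, rfl⟩, rfl⟩
    exact heL
  · intro hkL
    exact ⟨((k : Int), h'), ⟨hkL, rfl⟩, rfl⟩

theorem pv_cellOf_bounds (n : Int) (b : List (List (Option Char))) (x : Int × Int)
    (h : pvCellOf n b x) :
    0 ≤ x.1 ∧ x.1 < n ∧ 0 ≤ x.2 ∧ x.2 < ((PySem.List.pyGetD b x.1 []).length : Int) := by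
  obtain ⟨i, j, hi0, hi1, hbl, hcell⟩ := h
  obtain ⟨hj1, hj2, -⟩ := hbl
  simp only [pvCells, List.mem_cons, List.not_mem_nil, or_false] at hcell
  rcases hcell with rfl | rfl | rfl | rfl <;> dsimp only <;>
    exact ⟨by omega, by omega, by omega, by omega⟩

-- ---- one whole round of A: the post-pop board, columnwise, and the surviving invariant ----

theorem pv_round_eq (n : Int) (b : List (List (Option Char))) (change : List Bool)
    (hlen : b.length = n.toNat) (hInv : pvInv n b change)
    (hne : solutionRoundSet n b change ≠ []) :
    ((PySem.List.sorted (solutionRoundSet n b change) (fun x => x.2) true).foldl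
        solutionRemoveStep (b, (PySem.List.pyRange 0 n 1).map (fun _ => false))).1
      = (PySem.List.enumerate b 0).map (fun kc => pvNewCol (solutionRoundSet n b change) kc.1 kc.2)
    ∧ ((PySem.List.sorted (solutionRoundSet n b change) (fun x => x.2) true).foldl
        solutionRemoveStep (b, (PySem.List.pyRange 0 n 1).map (fun _ => false))).1.length = n.toNat
    ∧ pvInv n
        ((PySem.List.sorted (solutionRoundSet n b change) (fun x => x.2) true).foldl
          solutionRemoveStep (b, (PySem.List.pyRange 0 n 1).map (fun _ => false))).1
        ((PySem.List.sorted (solutionRoundSet n b change) (fun x => x.2) true).foldl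
          solutionRemoveStep (b, (PySem.List.pyRange 0 n 1).map (fun _ => false))).2 := by
  set s := solutionRoundSet n b change with hs_def
  set nc0 := (PySem.List.pyRange 0 n 1).map (fun _ => false) with hnc0_def
  set L := PySem.List.sorted s (fun x => x.2) true with hL_def
  set st := L.foldl solutionRemoveStep (b, nc0) with hst_def
  have hms : ∀ x, x ∈ s ↔ pvCellOf n b x := pv_mem_roundSet n b change hInv
  have hnds : s.Nodup := pv_nodup_roundSet n b change
  have hn0 : 0 ≤ n := by
    obtain ⟨x, hx⟩ := List.exists_mem_of_ne_nil _ hne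
    have := pv_cellOf_bounds n b x ((hms x).mp hx)
    omega
  have hblen : (b.length : Int) = n := by omega
  have hnc0len : nc0.length = n.toNat := by
    rw [hnc0_def, List.length_map, PySem.List.length_pyRange_one]
    omega
  have hLmem : ∀ e ∈ L, pvCellOf n b e := by
    intro e he
    exact (hms e).mp ((PySem.List.mem_sorted s _ true e).mp he)
  have hLmem' : ∀ e, e ∈ L ↔ pvCellOf n b e := by
    intro e
    rw [PySem.List.mem_sorted s _ true e]
    exact hms e
  have hbnds : ∀ e ∈ L, 0 ≤ e.1 ∧ e.1 < (b.length : Int) ∧ e.1 < (nc0.length : Int) := by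
    intro e he
    have hb := pv_cellOf_bounds n b e (hLmem e he)
    refine ⟨hb.1, by omega, by omega⟩
  have hspec := pv_removeFold_spec L b nc0 hbnds
  have hlens := pv_removeFold_len L b nc0
  have hLnd : L.Nodup := ((PySem.List.sorted_perm s (fun x => x.2) true).nodup_iff).mpr hnds
  have hLpair : L.Pairwise (fun a b => b.2 ≤ a.2) := PySem.List.sorted_pairwise_rev s (fun x => x.2)
  -- heights are strictly decreasing and in range, per column
  have hhd : ∀ k : Nat, (pvHeights L k).Pairwise (fun a b => b < a) := by
    intro k
    unfold pvHeights
    rw [List.pairwise_map]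
    have hcomb : (L.filter (fun e => decide (e.1 = (k : Int)))).Pairwise
        (fun a b => (b.2 ≤ a.2) ∧ a ≠ b) := (hLpair.and hLnd).filter _
    refine hcomb.imp_of_mem ?_
    intro a c ha hc ⟨hle, hne'⟩
    have ha1 : a.1 = (k : Int) := by simpa using (List.mem_filter.mp ha).2
    have hc1 : c.1 = (k : Int) := by simpa using (List.mem_filter.mp hc).2
    rcases lt_or_eq_of_le hle with h | h
    · exact h
    · exfalso
      exact hne' (Prod.ext (ha1.trans hc1.symm) h.symm)
  have hhv : ∀ (k : Nat) (hk : k < b.length),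
      ∀ h' ∈ pvHeights L k, 0 ≤ h' ∧ h' < ((b[k]).length : Int) := by
    intro k hk h' hh'
    have hkL : ((k : Int), h') ∈ L := (pv_mem_heights L k h').mp hh'
    have hb := pv_cellOf_bounds n b _ (hLmem _ hkL)
    have hgd : PySem.List.pyGetD b ((k : Int)) [] = b[k] := by
      rw [PySem.List.pyGetD_eq_getElem b [] (by omega) (by omega)]
      simp
    rw [hgd] at hb
    exact ⟨hb.2.2.1, hb.2.2.2⟩
  -- the first claim: the new board, columnwise
  have hmain : st.1 = (PySem.List.enumerate b 0).map (fun kc => pvNewCol s kc.1 kc.2) := by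
    apply List.ext_getElem?
    intro k
    rw [(hspec k).1, List.getElem?_map, PySem.List.getElem?_enumerate, Option.map_map]
    by_cases hk : k < b.length
    · rw [List.getElem?_eq_getElem hk]
      simp only [Option.map_some, Function.comp]
      rw [pv_popFold_eq_filter (pvHeights L k) b[k] (hhd k) (hhv k hk)]
      unfold pvNewCol
      refine congrArg _ (congrArg _ (List.filter_congr ?_))
      intro hc _
      have hiff : hc.1 ∈ pvHeights L k ↔ ((0 : Int) + (k : Int), hc.1) ∈ s := by
        rw [pv_mem_heights L k hc.1, hLmem' ((k : Int), hc.1), zero_add, hms ((k : Int), hc.1)]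
      have hbv : ((pvHeights L k).contains hc.1)
          = (PySem.Set.contains s ((0 : Int) + (k : Int), hc.1)) := by
        rw [Bool.eq_iff_iff, PySem.Set.contains_iff, List.contains_eq_mem, decide_eq_true_eq]
        exact hiff
      rw [hbv]
    · rw [List.getElem?_eq_none (by omega)]
      rfl
  refine ⟨hmain, by rw [hlens.1, hlen], ?_⟩
  -- the invariant for the next round
  intro i j hi0 hi1 hci hci1
  have hst2len : st.2.length = n.toNat := by rw [hlens.2, hnc0len]
  have hst1len : st.1.length = n.toNat := by rw [hlens.1, hlen]
  -- a false entry of the new change list means: no pop touched that column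
  have hchange : ∀ (ii : Int), 0 ≤ ii → ii < n →
      PySem.List.pyGetD st.2 ii false = false →
      L.any (fun e => decide (e.1 = ((ii.toNat : Nat) : Int))) = false := by
    intro ii h0 h1 hfalse
    have hkn2 : ii.toNat < st.2.length := by omega
    have h2 := (hspec ii.toNat).2
    have hrk : ii.toNat < (PySem.List.pyRange 0 n 1).length := by
      rw [PySem.List.length_pyRange_one]
      omega
    have hnc0k : nc0[ii.toNat]? = some false := by
      rw [hnc0_def, List.getElem?_map, List.getElem?_eq_getElem hrk]
      rfl
    rw [hnc0k] at h2
    simp only [Option.map_some, Bool.false_or] at h2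
    rw [PySem.List.pyGetD_eq_getElem st.2 false h0 (by omega)] at hfalse
    rw [List.getElem?_eq_getElem hkn2, Option.some.injEq] at h2
    rw [h2] at hfalse
    exact hfalse
  -- an untouched column is unchanged
  have hcol : ∀ (ii : Int), 0 ≤ ii → ii < n →
      L.any (fun e => decide (e.1 = ((ii.toNat : Nat) : Int))) = false →
      PySem.List.pyGetD st.1 ii [] = PySem.List.pyGetD b ii [] := by
    intro ii h0 h1 hany
    have hkb : ii.toNat < b.length := by omega
    have hheights : pvHeights L ii.toNat = [] := by
      unfold pvHeights
      rw [List.filter_eq_nil_iff.mpr ?_]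
      · rfl
      · intro e he
        have := (List.any_eq_false.mp hany) e he
        simpa using this
    have h1spec := (hspec ii.toNat).1
    rw [List.getElem?_eq_getElem hkb, hheights] at h1spec
    simp only [List.foldl_nil, Option.map_some] at h1spec
    rw [PySem.List.pyGetD_eq_getElem st.1 [] h0 (by omega),
      PySem.List.pyGetD_eq_getElem b [] h0 (by omega)]
    rw [List.getElem?_eq_getElem (by omega : ii.toNat < st.1.length)] at h1spec
    exact Option.some.inj h1spec
  have hanyi := hchange i hi0 (by omega) hci
  have hanyi1 := hchange (i+1) (by omega) (by omega) hci1
  intro hbl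
  have hbl' : pvBlockAt b i j := by
    unfold pvBlockAt at hbl ⊢
    rw [hcol i hi0 (by omega) hanyi, hcol (i+1) (by omega) (by omega) hanyi1] at hbl
    exact hbl
  have hinL : (i, j) ∈ L := (hLmem' (i, j)).mpr ⟨i, j, hi0, hi1, hbl', by simp [pvCells]⟩
  have : L.any (fun e => decide (e.1 = ((i.toNat : Nat) : Int))) = true := by
    rw [List.any_eq_true]
    refine ⟨(i, j), hinL, by simp only [decide_eq_true_eq]; omega⟩
  rw [this] at hanyi
  exact absurd hanyi (by decide)

-- ---- B side: reading the canonical grid ----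

theorem pv_gget_gridOf (m n : Int) (b : List (List (Option Char))) (i j : Int)
    (h0i : 0 ≤ i) (him : i < m) (h0j : 0 ≤ j) (hjn : j < n) :
    pvGGet (pvGridOf m n b) i j
      = (PySem.List.pyGet? (PySem.List.pyGetD b j []) (m-1-i)).join := by
  unfold pvGGet pvGridOf
  rw [PySem.List.pyGetD_map_pyRange_of_nonneg _ _ _ _ h0i him,
    PySem.List.pyGetD_map_pyRange_of_nonneg _ _ _ _ h0j hjn]

theorem pv_join_ne_none (col : List (Option Char)) (hsome : ∀ c ∈ col, c.isSome)
    (h : Int) (h0 : 0 ≤ h) :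
    (PySem.List.pyGet? col h).join ≠ none ↔ h < (col.length : Int) := by
  rw [PySem.List.pyGet?_of_nonneg col h0]
  by_cases hlt : h.toNat < col.length
  · rw [List.getElem?_eq_getElem hlt]
    have := hsome _ (List.getElem_mem hlt)
    simp only [Option.join_some]
    constructor
    · intro _; omega
    · intro _; exact Option.isSome_iff_ne_none.mp this
  · rw [List.getElem?_eq_none (by omega)]
    simp only [Option.join_none]
    constructor
    · intro h'; exact absurd rfl h'
    · intro h'; omega

theorem pv_join_in_range (col : List (Option Char)) (h : Int) (h0 : 0 ≤ h)
    (hlt : h < (col.length : Int)) :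
    PySem.List.pyGet? col h = some (col[h.toNat]'(by omega)) := by
  rw [PySem.List.pyGet?_of_nonneg col h0, List.getElem?_eq_getElem (by omega)]

-- ---- B's marked set = the block cells, transported by the coordinate change ----

theorem pv_cond_iff (m n : Int) (b : List (List (Option Char))) (hwf : pvWF m n b)
    (i j : Int) (h0i : 0 ≤ i) (him : i < m - 1) (h0j : 0 ≤ j) (hjn : j < n - 1) :
    (pvGGet (pvGridOf m n b) i j ≠ none
      ∧ pvGGet (pvGridOf m n b) i j = pvGGet (pvGridOf m n b) i (j+1)
      ∧ pvGGet (pvGridOf m n b) i (j+1) = pvGGet (pvGridOf m n b) (i+1) j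
      ∧ pvGGet (pvGridOf m n b) (i+1) j = pvGGet (pvGridOf m n b) (i+1) (j+1))
    ↔ pvBlockAt b j (m-1-i) := by
  obtain ⟨hblen, hcols⟩ := hwf
  have hj1 : j.toNat < b.length := by omega
  have hj2 : (j+1).toNat < b.length := by omega
  have hr1 : PySem.List.pyGetD b j [] = b[j.toNat] :=
    PySem.List.pyGetD_eq_getElem b [] h0j (by omega)
  have hr2 : PySem.List.pyGetD b (j+1) [] = b[(j+1).toNat] :=
    PySem.List.pyGetD_eq_getElem b [] (by omega) (by omega)
  obtain ⟨hl1, hs1⟩ := hcols _ (List.getElem_mem hj1)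
  obtain ⟨hl2, hs2⟩ := hcols _ (List.getElem_mem hj2)
  rw [← hr1] at hl1 hs1
  rw [← hr2] at hl2 hs2
  set r1 := PySem.List.pyGetD b j [] with hr1d
  set r2 := PySem.List.pyGetD b (j+1) [] with hr2d
  have e1 : m - 1 - (i+1) = m - 1 - i - 1 := by ring
  rw [pv_gget_gridOf m n b i j h0i (by omega) h0j (by omega),
    pv_gget_gridOf m n b i (j+1) h0i (by omega) (by omega) (by omega),
    pv_gget_gridOf m n b (i+1) j (by omega) (by omega) h0j (by omega),
    pv_gget_gridOf m n b (i+1) (j+1) (by omega) (by omega) (by omega) (by omega), e1]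
  rw [← hr1d, ← hr2d]
  unfold pvBlockAt
  rw [← hr1d, ← hr2d]
  set h := m - 1 - i with hhd
  have hh1 : 1 ≤ h := by omega
  unfold pvBlockRows
  constructor
  · rintro ⟨hne, he1, he2, he3⟩
    have hhr1 : h < (r1.length : Int) := (pv_join_ne_none r1 hs1 h (by omega)).mp hne
    have g1 := pv_join_in_range r1 h (by omega) hhr1
    have hne2 : (PySem.List.pyGet? r2 h).join ≠ none := by rw [← he1]; exact hne
    have hhr2 : h < (r2.length : Int) := (pv_join_ne_none r2 hs2 h (by omega)).mp hne2
    have g2 := pv_join_in_range r2 h (by omega) hhr2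
    have g3 := pv_join_in_range r1 (h-1) (by omega) (by omega)
    have g4 := pv_join_in_range r2 (h-1) (by omega) (by omega)
    rw [g1, g2, Option.join_some, Option.join_some] at he1
    rw [g2, g3, Option.join_some, Option.join_some] at he2
    rw [g3, g4, Option.join_some, Option.join_some] at he3
    refine ⟨hh1, by omega, ?_, ?_, ?_⟩
    · rw [g1, g2, he1]
    · rw [g3, g4, he3]
    · rw [g1, g3, he1, he2]
  · rintro ⟨hk1, hkmin, hq1, hq2, hq3⟩
    have hhr1 : h < (r1.length : Int) := by omega
    have hhr2 : h < (r2.length : Int) := by omega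
    have g1 := pv_join_in_range r1 h (by omega) hhr1
    have hne : (PySem.List.pyGet? r1 h).join ≠ none := by
      rw [g1, Option.join_some]
      exact Option.isSome_iff_ne_none.mp (hs1 _ (List.getElem_mem (by omega)))
    exact ⟨hne, congrArg Option.join hq1, congrArg Option.join (hq1.symm.trans hq3),
      congrArg Option.join hq2⟩

theorem pv_mem_altMarked (m n : Int) (b : List (List (Option Char))) (hwf : pvWF m n b)
    (x : Int × Int) :
    x ∈ solutionAltMarked m n (pvGridOf m n b) ↔ pvCellOf n b (pvToA m x) := by
  obtain ⟨hblen, hcols⟩ := hwf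
  unfold solutionAltMarked
  have hstep : ∀ (s : PySem.Set (Int × Int)) (i : Int), i ∈ PySem.List.pyRange 0 (m-1) 1 →
      ∀ x : Int × Int,
      (x ∈ (PySem.List.pyRange 0 (n-1) 1).foldl (fun s j =>
          if pvGGet (pvGridOf m n b) i j ≠ none
             ∧ pvGGet (pvGridOf m n b) i j = pvGGet (pvGridOf m n b) i (j+1)
             ∧ pvGGet (pvGridOf m n b) i (j+1) = pvGGet (pvGridOf m n b) (i+1) j
             ∧ pvGGet (pvGridOf m n b) (i+1) j = pvGGet (pvGridOf m n b) (i+1) (j+1)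
          then PySem.Set.update s [(i, j), (i, j+1), (i+1, j), (i+1, j+1)]
          else s) s
        ↔ x ∈ s ∨ ∃ j : Int, j ∈ PySem.List.pyRange 0 (n-1) 1 ∧
            (pvBlockAt b j (m-1-i) ∧ x ∈ [(i, j), (i, j+1), (i+1, j), (i+1, j+1)])) := by
    intro s i hi x
    obtain ⟨hi0, him⟩ := PySem.List.mem_pyRange_one.mp hi
    refine pv_mem_foldl_accum _ _
      (fun j x => pvBlockAt b j (m-1-i) ∧ x ∈ [(i, j), (i, j+1), (i+1, j), (i+1, j+1)]) ?_ s x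
    intro s' j hj x'
    obtain ⟨hj0, hjn⟩ := PySem.List.mem_pyRange_one.mp hj
    have hcond := pv_cond_iff m n b ⟨hblen, hcols⟩ i j hi0 him hj0 hjn
    by_cases hc : pvGGet (pvGridOf m n b) i j ≠ none
        ∧ pvGGet (pvGridOf m n b) i j = pvGGet (pvGridOf m n b) i (j+1)
        ∧ pvGGet (pvGridOf m n b) i (j+1) = pvGGet (pvGridOf m n b) (i+1) j
        ∧ pvGGet (pvGridOf m n b) (i+1) j = pvGGet (pvGridOf m n b) (i+1) (j+1)
    · rw [if_pos hc, PySem.Set.mem_update]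
      have hbl := hcond.mp hc
      constructor
      · rintro (h | h)
        · exact Or.inl h
        · exact Or.inr ⟨hbl, h⟩
      · rintro (h | ⟨-, h⟩)
        · exact Or.inl h
        · exact Or.inr h
    · rw [if_neg hc]
      constructor
      · intro h
        exact Or.inl h
      · rintro (h | ⟨hbl, -⟩)
        · exact h
        · exact absurd (hcond.mpr hbl) hc
  rw [pv_mem_foldl_accum _ _
    (fun i x => ∃ j : Int, j ∈ PySem.List.pyRange 0 (n-1) 1 ∧
      (pvBlockAt b j (m-1-i) ∧ x ∈ [(i, j), (i, j+1), (i+1, j), (i+1, j+1)])) hstep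
    PySem.Set.empty x]
  unfold pvCellOf
  obtain ⟨x1, x2⟩ := x
  constructor
  · rintro (h | ⟨i, hi, j, hj, hbl, hmem⟩)
    · simp [PySem.Set.empty] at h
    · obtain ⟨hi0, him⟩ := PySem.List.mem_pyRange_one.mp hi
      obtain ⟨hj0, hjn⟩ := PySem.List.mem_pyRange_one.mp hj
      refine ⟨j, m-1-i, hj0, hjn, hbl, ?_⟩
      simp only [List.mem_cons, Prod.mk.injEq, List.not_mem_nil, or_false, pvToA,
        pvCells] at hmem ⊢
      omega
  · rintro ⟨c, h, hc0, hcn, hbl, hcell⟩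
    have hlc : (PySem.List.pyGetD b c []).length ≤ m.toNat := by
      have : PySem.List.pyGetD b c [] = b[c.toNat]'(by omega) :=
        PySem.List.pyGetD_eq_getElem b [] hc0 (by omega)
      rw [this]
      exact (hcols _ (List.getElem_mem (by omega))).1
    obtain ⟨hh1, hhmin, -⟩ := id hbl
    refine Or.inr ⟨m-1-h, PySem.List.mem_pyRange_one.mpr ⟨by omega, by omega⟩,
      c, PySem.List.mem_pyRange_one.mpr ⟨hc0, hcn⟩, ?_, ?_⟩
    · have : m - 1 - (m - 1 - h) = h := by ring
      rwa [this]
    · simp only [List.mem_cons, Prod.mk.injEq, List.not_mem_nil, or_false, pvToA,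
        pvCells] at hcell ⊢
      omega

theorem pv_nodup_altMarked (m n : Int) (grid : List (List (Option Char))) :
    (solutionAltMarked m n grid).Nodup := by
  unfold solutionAltMarked
  refine pv_foldl_preserve _ (fun (s : PySem.Set (Int × Int)) => s.Nodup) ?_ _ _ List.nodup_nil
  intro s i hnd
  refine pv_foldl_preserve _ (fun (s : PySem.Set (Int × Int)) => s.Nodup) ?_ _ _ hnd
  intro s j hnd'
  split_ifs with hc
  · exact PySem.Set.nodup_update _ _ hnd'
  · exact hnd'

-- ---- the coordinate change is a bijection ----

theorem pv_toA_toB (m : Int) (y : Int × Int) : pvToA m (pvToB m y) = y := by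
  cases y; simp [pvToA, pvToB]

theorem pv_toB_toA (m : Int) (x : Int × Int) : pvToB m (pvToA m x) = x := by
  cases x; simp [pvToA, pvToB]

-- ---- B's gravity on the canonical grid = the canonical grid of A's popped board ----

-- the 'keep' comprehension of one gravity column, read off against the filtered column
theorem pv_keep_eq (m : Int) (col : List (Option Char)) (p : Int → Bool)
    (hlen : col.length ≤ m.toNat) (hsome : ∀ c ∈ col, c.isSome) :
    ((PySem.List.pyRange 0 m 1).filter (fun i =>
        decide ((PySem.List.pyGet? col (m-1-i)).join ≠ none) && p (m-1-i))).map
      (fun i => (PySem.List.pyGet? col (m-1-i)).join)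
    = (((PySem.List.enumerate col 0).filter (fun hc => p hc.1)).map (·.2)).reverse := by
  have key : (((PySem.List.pyRange 0 m 1).filter (fun i =>
        decide ((PySem.List.pyGet? col (m-1-i)).join ≠ none) && p (m-1-i))).map
      (fun i => (PySem.List.pyGet? col (m-1-i)).join)).reverse
      = ((PySem.List.enumerate col 0).filter (fun hc => p hc.1)).map (·.2) := by
    rw [← List.map_reverse, ← List.filter_reverse]
    have hrev : (PySem.List.pyRange 0 m 1).reverse = PySem.List.pyRange (m-1) (-1) (-1) := by
      have h := PySem.List.pyRange_neg_one_eq_reverse (m-1) (-1)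
      norm_num at h
      rw [h]
    have hm : m - 1 - (-1) = m := by ring
    rw [hrev, PySem.List.pyRange_neg_one, hm, List.filter_map, List.map_map]
    simp only [Function.comp_def, sub_sub_cancel]
    -- right side, as the same shape over List.range
    have hlencast : PySem.List.len col = ((col.length : Nat) : Int) := by
      simp [PySem.List.len]
    rw [PySem.List.enumerate_eq_map_pyRange col none, hlencast,
      PySem.List.pyRange_zero_natCast, List.map_map, List.filter_map, List.map_map]
    simp only [Function.comp_def]
    -- split the i-range at the column length
    have hM : m.toNat = col.length + (m.toNat - col.length) := by omega
    rw [hM, List.range_add, List.filter_append, List.map_append]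
    have hdead : (List.map (fun x => col.length + x) (List.range (m.toNat - col.length))).filter
        (fun (k : Nat) => decide ((PySem.List.pyGet? col ((k : Int))).join ≠ none) && p (k : Int)) = [] := by
      rw [List.filter_eq_nil_iff]
      intro k hk
      obtain ⟨t, -, rfl⟩ := List.mem_map.mp hk
      rw [PySem.List.pyGet?_natCast, List.getElem?_eq_none (by omega), Option.join_none]
      simp
    rw [hdead, List.map_nil, List.append_nil]
    have hlive : (List.range col.length).filter
        (fun (k : Nat) => decide ((PySem.List.pyGet? col ((k : Int))).join ≠ none) && p (k : Int))
        = (List.range col.length).filter (fun (k : Nat) => p (k : Int)) := by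
      refine List.filter_congr ?_
      intro k hk
      have hklt : k < col.length := List.mem_range.mp hk
      rw [PySem.List.pyGet?_natCast, List.getElem?_eq_getElem hklt, Option.join_some]
      have : col[k] ≠ none := Option.isSome_iff_ne_none.mp (hsome _ (List.getElem_mem hklt))
      simp [this]
    rw [hlive]
    refine List.map_congr_left ?_
    intro k hk
    have hklt : k < col.length := List.mem_range.mp (List.mem_filter.mp hk).1
    rw [PySem.List.pyGet?_natCast, List.getElem?_eq_getElem hklt, Option.join_some,
      PySem.List.pyGetD_eq_getElem col none (by omega) (by exact_mod_cast hklt)]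
    simp
  rw [← key, List.reverse_reverse]

-- reading one padded gravity column at row i = reading the filtered column at height m-1-i
theorem pv_pad_get (col' : List (Option Char)) (m i : Int)
    (hlen : (col'.length : Int) ≤ m) (h0 : 0 ≤ i) (him : i < m) :
    PySem.List.pyGetD
        (PySem.List.pyRepeat [(none : Option Char)] (m - (col'.length : Int)) ++ col'.reverse)
        i none
      = (PySem.List.pyGet? col' (m-1-i)).join := by
  rw [PySem.List.pyRepeat_singleton]
  have hK : (m - (col'.length : Int)).toNat = m.toNat - col'.length := by omega
  have htot : (List.replicate (m - (col'.length : Int)).toNat (none : Option Char)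
      ++ col'.reverse).length = m.toNat := by
    rw [List.length_append, List.length_replicate, List.length_reverse]
    omega
  rw [PySem.List.pyGetD_eq_getElem _ none h0 (by rw [htot]; omega)]
  by_cases hi : i.toNat < (m - (col'.length : Int)).toNat
  · rw [List.getElem_append_left (by rwa [List.length_replicate]), List.getElem_replicate]
    rw [PySem.List.pyGet?_of_nonneg col' (by omega : (0:Int) ≤ m-1-i),
      List.getElem?_eq_none (by omega), Option.join_none]
  · rw [List.getElem_append_right (by simp only [List.length_replicate]; omega)]
    rw [List.getElem_reverse]
    rw [pv_join_in_range col' (m-1-i) (by omega) (by omega), Option.join_some]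
    have hidx : col'.length - 1 - (i.toNat - (List.replicate
          (m - (col'.length : Int)).toNat (none : Option Char)).length) = (m-1-i).toNat := by
      rw [List.length_replicate]
      omega
    simp only [hidx]

theorem pv_gravity_eq (m n : Int) (b : List (List (Option Char))) (hwf : pvWF m n b)
    (s marked : PySem.Set (Int × Int))
    (hsm : ∀ x : Int × Int, x ∈ marked ↔ pvToA m x ∈ s) :
    solutionAltGravity m n (pvGridOf m n b) marked
      = pvGridOf m n ((PySem.List.enumerate b 0).map (fun kc => pvNewCol s kc.1 kc.2)) := by
  obtain ⟨hblen, hcols⟩ := hwf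
  conv_rhs => unfold pvGridOf
  unfold solutionAltGravity
  refine List.map_congr_left ?_
  intro i hi
  obtain ⟨hi0, him⟩ := PySem.List.mem_pyRange_one.mp hi
  refine List.map_congr_left ?_
  intro j hj
  obtain ⟨hj0, hjn⟩ := PySem.List.mem_pyRange_one.mp hj
  -- the column of b at j
  have hjb : j.toNat < b.length := by omega
  have hcolget : PySem.List.pyGetD b j [] = b[j.toNat] :=
    PySem.List.pyGetD_eq_getElem b [] hj0 (by omega)
  set col := PySem.List.pyGetD b j [] with hcold
  obtain ⟨hclen, hcsome⟩ := hcols _ (hcolget ▸ List.getElem_mem hjb)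
  -- rewrite the keep comprehension into the filtered-column form
  have hkeep : ((PySem.List.pyRange 0 m 1).filter (fun i' =>
        decide (pvGGet (pvGridOf m n b) i' j ≠ none)
          && !(PySem.Set.contains marked (i', j)))).map
      (fun i' => pvGGet (pvGridOf m n b) i' j)
      = ((PySem.List.pyRange 0 m 1).filter (fun i' =>
          decide ((PySem.List.pyGet? col (m-1-i')).join ≠ none)
            && !(PySem.Set.contains s (j, m-1-i')))).map
        (fun i' => (PySem.List.pyGet? col (m-1-i')).join) := by
    have hcm : ∀ i' : Int, (PySem.Set.contains marked (i', j))
        = (PySem.Set.contains s (j, m-1-i')) := by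
      intro i'
      rw [Bool.eq_iff_iff, PySem.Set.contains_iff, PySem.Set.contains_iff]
      exact hsm (i', j)
    have hgg : ∀ i' ∈ PySem.List.pyRange 0 m 1,
        pvGGet (pvGridOf m n b) i' j = (PySem.List.pyGet? col (m-1-i')).join := by
      intro i' hi'
      obtain ⟨h1, h2⟩ := PySem.List.mem_pyRange_one.mp hi'
      rw [pv_gget_gridOf m n b i' j h1 h2 hj0 hjn]
    rw [List.filter_congr (fun i' hi' => by rw [hgg i' hi', hcm i'])]
    refine List.map_congr_left ?_
    intro i' hi'
    exact hgg i' (List.mem_filter.mp hi').1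
  -- the gravity column at j is the padded reverse of the filtered column
  have hcolsj : PySem.List.pyGetD (solutionAltCols m n (pvGridOf m n b) marked) j []
      = PySem.List.pyRepeat [(none : Option Char)]
          (m - (((pvNewCol s j col).reverse.length : Nat) : Int)) ++ (pvNewCol s j col).reverse := by
    unfold solutionAltCols
    rw [PySem.List.pyGetD_map_pyRange_of_nonneg _ _ _ _ hj0 hjn]
    rw [hkeep, pv_keep_eq m col (fun h => !(PySem.Set.contains s (j, h))) hclen hcsome]
    rfl
  rw [hcolsj, List.length_reverse]
  have hlen' : ((pvNewCol s j col).length : Int) ≤ m := by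
    have h1 : (pvNewCol s j col).length ≤ col.length := by
      unfold pvNewCol
      rw [List.length_map]
      calc ((PySem.List.enumerate col 0).filter _).length
          ≤ (PySem.List.enumerate col 0).length := List.length_filter_le _ _
        _ = col.length := PySem.List.length_enumerate col 0
    omega
  rw [pv_pad_get (pvNewCol s j col) m i hlen' hi0 him]
  -- the right side: the column of the popped board at j
  have hlenb' : j.toNat < ((PySem.List.enumerate b 0).map
      (fun kc => pvNewCol s kc.1 kc.2)).length := by
    rw [List.length_map, PySem.List.length_enumerate]
    omega
  rw [PySem.List.pyGetD_eq_getElem _ [] hj0 (by omega), List.getElem_map,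
    PySem.List.getElem_enumerate]
  have hz : (0 : Int) + (j.toNat : Int) = j := by omega
  rw [hz, ← hcolget]

theorem pv_wf_newb (m n : Int) (b : List (List (Option Char))) (hwf : pvWF m n b)
    (s : PySem.Set (Int × Int)) :
    pvWF m n ((PySem.List.enumerate b 0).map (fun kc => pvNewCol s kc.1 kc.2)) := by
  obtain ⟨hlen, hcols⟩ := hwf
  refine ⟨by rw [List.length_map, PySem.List.length_enumerate, hlen], ?_⟩
  intro col hcol
  obtain ⟨kc, hkc, rfl⟩ := List.mem_map.mp hcol
  obtain ⟨k, hk, rfl⟩ := (PySem.List.mem_enumerate_iff b 0 kc).mp hkc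
  have hbk : b[k] ∈ b := List.getElem_mem hk
  obtain ⟨hblen, hbsome⟩ := hcols _ hbk
  constructor
  · calc (pvNewCol s (0 + (k:Int)) b[k]).length
        ≤ (PySem.List.enumerate b[k] 0).length := by
          unfold pvNewCol
          rw [List.length_map]
          exact List.length_filter_le _ _
      _ ≤ m.toNat := by rw [PySem.List.length_enumerate]; exact hblen
  · intro c hc
    unfold pvNewCol at hc
    obtain ⟨hc', hhc, rfl⟩ := List.mem_map.mp hc
    have : hc'.2 ∈ b[k] := by
      have := (List.mem_filter.mp hhc).1
      obtain ⟨t, ht, rfl⟩ := (PySem.List.mem_enumerate_iff b[k] 0 hc').mp this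
      exact List.getElem_mem ht
    exact hbsome _ this

-- ---- the two while-loops agree round by round ----

theorem pv_toB_inj (m : Int) : Function.Injective (pvToB m) := by
  intro a c h
  cases a
  cases c
  simp only [pvToB, Prod.mk.injEq] at h ⊢
  omega

theorem pv_loop_eq (m n : Int) : ∀ (fuel : Nat) (b : List (List (Option Char)))
    (change : List Bool) (answer : Int),
    pvWF m n b → pvInv n b change →
    solutionLoop n fuel b change answer = solutionAltLoop m n fuel (pvGridOf m n b) answer := by
  intro fuel
  induction fuel with
  | zero => intro b change answer _ _; rfl
  | succ fuel ih =>
    intro b change answer hwf hInv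
    simp only [solutionLoop, solutionAltLoop]
    set s := solutionRoundSet n b change with hs_def
    set marked := solutionAltMarked m n (pvGridOf m n b) with hm_def
    have hsm : ∀ x, x ∈ marked ↔ pvToA m x ∈ s := by
      intro x
      rw [hm_def, hs_def, pv_mem_altMarked m n b hwf x, pv_mem_roundSet n b change hInv]
    have hiff : s = [] ↔ marked = [] := by
      rw [List.eq_nil_iff_forall_not_mem, List.eq_nil_iff_forall_not_mem]
      constructor
      · intro h x hx
        exact h _ ((hsm x).mp hx)
      · intro h y hy
        refine h (pvToB m y) ((hsm (pvToB m y)).mpr ?_)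
        rwa [pv_toA_toB]
    by_cases hs : s = []
    · rw [if_pos hs, if_pos (hiff.mp hs)]
    · rw [if_neg hs, if_neg (fun h => hs (hiff.mpr h))]
      obtain ⟨hb', hlen', hInv'⟩ := pv_round_eq n b change hwf.1 hInv hs
      have hwf' : pvWF m n ((PySem.List.sorted s (fun x => x.2) true).foldl solutionRemoveStep
          (b, (PySem.List.pyRange 0 n 1).map (fun _ => false))).1 := by
        rw [hb']
        exact pv_wf_newb m n b hwf s
      have hperm : marked.Perm (s.map (pvToB m)) := by
        refine (List.perm_ext_iff_of_nodup (pv_nodup_altMarked m n _)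
          ((pv_nodup_roundSet n b change).map (pv_toB_inj m))).mpr ?_
        intro x
        rw [hsm x, List.mem_map]
        constructor
        · intro hx
          exact ⟨pvToA m x, hx, pv_toB_toA m x⟩
        · rintro ⟨y, hy, rfl⟩
          rwa [pv_toA_toB]
      have hcnt : PySem.Set.len marked = PySem.Set.len s := by
        unfold PySem.Set.len
        rw [hperm.length_eq, List.length_map]
      calc solutionLoop n fuel _ _ (answer + PySem.Set.len s)
          = solutionAltLoop m n fuel (pvGridOf m n ((PySem.List.sorted s (fun x => x.2) true).foldl
              solutionRemoveStep (b, (PySem.List.pyRange 0 n 1).map (fun _ => false))).1)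
              (answer + PySem.Set.len s) := ih _ _ _ hwf' hInv'
        _ = solutionAltLoop m n fuel (solutionAltGravity m n (pvGridOf m n b) marked)
              (answer + PySem.Set.len marked) := by
            rw [hb', pv_gravity_eq m n b hwf s marked hsm, hcnt]

-- ---- the initial states of the two ports coincide ----

theorem pv_grid_init (m n : Int) (board : List String) :
    pvGridOf m n ((PySem.List.pyRange 0 n 1).map (fun j =>
        (PySem.List.pyRange 0 m 1).map (fun i =>
          PySem.Str.pyGet? (PySem.List.pyGetD board (m-1-i) "") j)))
      = (PySem.List.pyRange 0 m 1).map (fun i =>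
          (PySem.List.pyRange 0 n 1).map (fun j =>
            PySem.Str.pyGet? (PySem.List.pyGetD board i "") j)) := by
  unfold pvGridOf
  refine List.map_congr_left ?_
  intro i hi
  obtain ⟨hi0, him⟩ := PySem.List.mem_pyRange_one.mp hi
  refine List.map_congr_left ?_
  intro j hj
  obtain ⟨hj0, hjn⟩ := PySem.List.mem_pyRange_one.mp hj
  rw [PySem.List.pyGetD_map_pyRange_of_nonneg _ _ _ _ hj0 hjn,
    PySem.List.pyGet?_of_nonneg _ (by omega : (0:Int) ≤ m-1-i)]
  have hcast : PySem.List.pyRange 0 m 1 = PySem.List.pyRange 0 ((m.toNat : Int)) 1 := by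
    congr 1
    omega
  rw [hcast, PySem.List.getElem?_map_pyRange_zero _ m.toNat (m-1-i).toNat (by omega)]
  have harg : m - 1 - (((m-1-i).toNat : Nat) : Int) = i := by omega
  rw [harg, Option.join_some]

theorem pv_wf_init (m n : Int) (board : List String) (hpre : Pre_solution m n board) :
    pvWF m n ((PySem.List.pyRange 0 n 1).map (fun j =>
      (PySem.List.pyRange 0 m 1).map (fun i =>
        PySem.Str.pyGet? (PySem.List.pyGetD board (m-1-i) "") j))) := by
  refine ⟨by rw [List.length_map, PySem.List.length_pyRange_one]; congr 1; omega, ?_⟩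
  intro col hcol
  obtain ⟨j, hj, rfl⟩ := List.mem_map.mp hcol
  obtain ⟨hj0, hjn⟩ := PySem.List.mem_pyRange_one.mp hj
  refine ⟨by rw [List.length_map, PySem.List.length_pyRange_one]; omega, ?_⟩
  intro c hc
  obtain ⟨i, hi, rfl⟩ := List.mem_map.mp hc
  obtain ⟨hi0, him⟩ := PySem.List.mem_pyRange_one.mp hi
  obtain ⟨hbl, hrows⟩ := hpre (by omega) (by omega)
  have hidx : (0:Int) ≤ m-1-i ∧ m-1-i < (board.length : Int) := by omega
  rw [PySem.List.pyGetD_eq_getElem board "" hidx.1 hidx.2]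
  have hmem : board[(m-1-i).toNat] ∈ board.take m.toNat := by
    have htk : (m-1-i).toNat < (board.take m.toNat).length := by
      rw [List.length_take]
      omega
    have := List.getElem_mem htk
    rwa [List.getElem_take] at this
  have hrow := hrows _ hmem
  have hjc : j = ((j.toNat : Nat) : Int) := by omega
  rw [hjc, PySem.Str.pyGet?_natCast]
  have hlc : board[(m-1-i).toNat].toList.length = board[(m-1-i).toNat].length := by
    simp
  have hjl : j.toNat < board[(m-1-i).toNat].toList.length := by omega
  rw [List.getElem?_eq_getElem hjl]
  rfl

theorem pv_init_inv (n : Int) (b : List (List (Option Char))) :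
    pvInv n b ((PySem.List.pyRange 0 n 1).map (fun _ => true)) := by
  intro i j hi0 hi1 hci _
  exfalso
  have hlt : i.toNat < ((PySem.List.pyRange 0 n 1).map (fun _ => true)).length := by
    rw [List.length_map, PySem.List.length_pyRange_one]
    omega
  rw [PySem.List.pyGetD_eq_getElem _ _ hi0 (by omega)] at hci
  simp at hci

-- ===== VERDICT (by name: the statement is the Claim_ definition above) =====
theorem solution_spec : Claim_equal_solution := by
  intro m n board _ hpre
  unfold Spec_solution solution solution_alt
  rw [← pv_grid_init m n board]
  exact pv_loop_eq m n _ _ _ 0 (pv_wf_init m n board hpre) (pv_init_inv n _)
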